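-- pv_equiv track=rewrite | github.com/guillermopecorari/cuatroenlinea | Tarea1.py | contenidoFila
-- ===== SOURCE A (Python) =====
-- def contenidoFila(nro_fila, tablero):
-- 	fila = []
-- 	x = 0
-- 	for columna in tablero:
-- 		x += 1
-- 		if x == nro_fila:
-- 			for celda in columna:
-- 				fila.append(celda)
-- 	return fila
-- ===== SOURCE B (Python) =====
-- def contenidoFila(nro_fila, tablero):
--     if 1 <= nro_fila <= len(tablero):
--         return list(tablero[nro_fila - 1])
--     return []
-- ===== Notes on version B (the rewrite author's own statement) =====
-- stated objective: simpler
-- what changed: Replaces the counter-scan over all rows with a bounds check and direct indexing of the target row.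
import Mathlib
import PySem

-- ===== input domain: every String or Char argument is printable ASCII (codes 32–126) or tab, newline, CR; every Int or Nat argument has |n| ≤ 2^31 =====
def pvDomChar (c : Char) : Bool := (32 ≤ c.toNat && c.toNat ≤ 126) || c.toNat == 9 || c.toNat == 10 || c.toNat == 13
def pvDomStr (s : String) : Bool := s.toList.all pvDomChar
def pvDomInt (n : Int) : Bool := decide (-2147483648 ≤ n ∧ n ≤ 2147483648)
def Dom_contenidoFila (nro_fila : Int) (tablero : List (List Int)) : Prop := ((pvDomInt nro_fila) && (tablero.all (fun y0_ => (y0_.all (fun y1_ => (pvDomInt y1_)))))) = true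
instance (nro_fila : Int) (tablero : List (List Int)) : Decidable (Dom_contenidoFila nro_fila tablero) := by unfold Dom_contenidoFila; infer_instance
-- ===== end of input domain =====

-- B replaces A's counter-scan over all rows with a bounds check and direct indexing (simpler).

-- ===== PORT A =====
-- A's outer for-loop with counter x and accumulator fila; the inner for-loop appends each cell.
def contenidoFila (nro_fila : Int) (tablero : List (List Int)) : List Int :=
  (tablero.foldl (fun (st : Int × List Int) columna =>
      let x := st.1 + 1
      let fila := if x == nro_fila then columna.foldl (fun f celda => f ++ [celda]) st.2 else st.2
      (x, fila)) (0, [])).2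

-- ===== PORT B =====
def contenidoFila_alt (nro_fila : Int) (tablero : List (List Int)) : List Int :=
  if 1 ≤ nro_fila ∧ nro_fila ≤ tablero.length then
    (PySem.List.pyGet? tablero (nro_fila - 1)).getD []
  else []

-- ===== PRECONDITION & SPEC =====
def Spec_contenidoFila (nro_fila : Int) (tablero : List (List Int)) (out : List Int) : Prop := out = contenidoFila_alt nro_fila tablero
instance (nro_fila : Int) (tablero : List (List Int)) (out : List Int) : Decidable (Spec_contenidoFila nro_fila tablero out) := by unfold Spec_contenidoFila; infer_instance

-- ===== CLAIM (what is proved, stated in full; the proofs are below) =====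
def Claim_equal_contenidoFila : Prop := ∀ (nro_fila : Int) (tablero : List (List Int)), Dom_contenidoFila nro_fila tablero → Spec_contenidoFila nro_fila tablero (contenidoFila nro_fila tablero)

-- ===== LEMMAS AND PROOFS =====

theorem foldl_append_cells (c : List Int) (f : List Int) :
    c.foldl (fun f celda => f ++ [celda]) f = f ++ c := by
  induction c generalizing f with
  | nil => simp
  | cons h t ih => simp [List.foldl, ih]

theorem loopA_char (nro_fila x : Int) (tablero : List (List Int)) (fila : List Int) :
    (tablero.foldl (fun (st : Int × List Int) columna =>
        let x := st.1 + 1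
        let fila := if x == nro_fila then columna.foldl (fun f celda => f ++ [celda]) st.2 else st.2
        (x, fila)) (x, fila)).2
    = fila ++ (if x < nro_fila ∧ nro_fila ≤ x + tablero.length then
        (PySem.List.pyGet? tablero (nro_fila - x - 1)).getD [] else []) := by
  induction tablero generalizing x fila with
  | nil =>
    rw [if_neg (by simp)]
    simp
  | cons c rest ih =>
    simp only [List.foldl_cons]
    rw [ih, foldl_append_cells]
    simp only [List.length_cons, Nat.cast_add, Nat.cast_one, beq_iff_eq]
    by_cases h : x + 1 = nro_fila
    · rw [if_pos h, if_neg (by omega),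
        if_pos (show x < nro_fila ∧ nro_fila ≤ x + ((rest.length : Int) + 1) by omega)]
      rw [show nro_fila - x - 1 = (0 : Int) from by omega]
      simp
    · rw [if_neg h]
      by_cases h2 : x + 1 < nro_fila ∧ nro_fila ≤ x + 1 + (rest.length : Int)
      · rw [if_pos h2,
          if_pos (show x < nro_fila ∧ nro_fila ≤ x + ((rest.length : Int) + 1) by omega)]
        congr 2
        rw [PySem.List.pyGet?_of_nonneg _ (by omega),
          PySem.List.pyGet?_of_nonneg _ (by omega)]
        rw [show (nro_fila - x - 1).toNat = (nro_fila - (x + 1) - 1).toNat + 1 from by omega]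
        simp
      · rw [if_neg h2,
          if_neg (show ¬ (x < nro_fila ∧ nro_fila ≤ x + ((rest.length : Int) + 1)) by omega)]

-- ===== VERDICT (by name: the statement is the Claim_ definition above) =====
theorem contenidoFila_spec : Claim_equal_contenidoFila := by
  intro nro_fila tablero _
  unfold Spec_contenidoFila contenidoFila contenidoFila_alt
  rw [loopA_char]
  simp only [Int.zero_add, List.nil_append]
  rw [show nro_fila - 0 - 1 = nro_fila - 1 from by ring]
  split_ifs with h1 h2 h3 <;> first | rfl | omega
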